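-- pv_equiv track=rewrite | github.com/FabianHirjan/News-Fetcher | thirdPythonLabHw.py | howManyPals
-- ===== SOURCE A (Python) =====
-- def isPalindrome(n):
--     res = str(n) == str(n)[::-1]
--     return res
--
-- def howManyPals(n):
--     maxSize = -1
--     howMany = 0
--     for number in n:
--         if isPalindrome(number):
--             howMany += 1
--             if len(str(number)) > maxSize:
--                 maxSize = len(str(number))
--     return (howMany, maxSize)
-- ===== SOURCE B (Python) =====
-- def palLen(x):
--     # digit-length of x if x is a decimal palindrome, else -1 (negatives never are:
--     # their string form starts with '-')
--     if x < 0: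
--         return -1
--     r, t, d = 0, x, 1
--     while t >= 10:
--         r = r * 10 + t % 10
--         t //= 10
--         d += 1
--     r = r * 10 + t
--     if r == x:
--         return d
--     return -1
--
-- def howManyPals(n):
--     sizes = [d for d in map(palLen, n) if d >= 0]
--     return (len(sizes), max(sizes, default=-1))
-- ===== Notes on version B (the rewrite author's own statement) =====
-- stated objective: alternative
-- what changed: B never builds str(x): it tests palindromicity by arithmetic digit reversal (r = r*10 + t%10; t //= 10), counting digits in the same loop, and then aggregates count and max length via len/max(default=-1) over the filtered size list, while A compares str(x) with its reverse inside one accumulating loop.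
import Mathlib
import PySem

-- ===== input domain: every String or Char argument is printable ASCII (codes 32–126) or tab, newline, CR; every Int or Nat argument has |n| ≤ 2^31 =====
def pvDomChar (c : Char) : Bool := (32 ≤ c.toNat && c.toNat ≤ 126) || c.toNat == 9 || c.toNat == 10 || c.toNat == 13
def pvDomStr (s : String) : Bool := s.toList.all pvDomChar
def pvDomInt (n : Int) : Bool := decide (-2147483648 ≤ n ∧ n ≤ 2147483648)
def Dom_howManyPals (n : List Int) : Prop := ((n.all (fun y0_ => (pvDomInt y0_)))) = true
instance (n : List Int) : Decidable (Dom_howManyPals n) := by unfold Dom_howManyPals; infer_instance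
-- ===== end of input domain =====

-- B drops strings entirely: it decides palindromicity by arithmetic digit reversal (and counts digits
-- in the same loop), then aggregates with len/max(default=-1) over the filtered size list; A builds
-- str(x) and compares it with its reverse inside one accumulating loop. Objective: alternative.


-- ===== PORT A =====
-- str(n) == str(n)[::-1]
def isPalindromeA (m : Int) : Bool :=
  let res := some (PySem.Int.toStr m) == PySem.Str.slice? (PySem.Int.toStr m) none none (-1)
  res

def howManyPals (n : List Int) : Int × Int :=
  -- state = (howMany, maxSize), initialised to (0, -1)
  n.foldl (fun (st : Int × Int) number =>
    if isPalindromeA number then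
      (st.1 + 1,
       if PySem.Str.len (PySem.Int.toStr number) > st.2 then
         PySem.Str.len (PySem.Int.toStr number)
       else st.2)
    else st) ((0 : Int), (-1 : Int))

-- ===== PORT B =====
-- the 'while t >= 10' loop of palLen, on the state (r, t, d)
def palLenGo (r t d : Int) : Int × Int × Int :=
  if h : 10 ≤ t then
    palLenGo (r * 10 + PySem.Int.mod t 10) (PySem.Int.floordiv t 10) (d + 1)
  else (r, t, d)
termination_by t.toNat
decreasing_by
  have h2 : PySem.Int.floordiv t 10 = t / 10 := PySem.Int.floordiv_eq_ediv_of_pos (by omega)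
  rw [h2]; omega

-- digit-length of x if x is a decimal palindrome, else -1 (arithmetic digit reversal, no strings)
def palLen (x : Int) : Int :=
  if x < 0 then -1
  else
    match palLenGo 0 x 1 with
    | (r, t, d) => if r * 10 + t == x then d else -1

def howManyPals_alt (n : List Int) : Int × Int :=
  let sizes := (n.map palLen).filter (fun d => decide (0 ≤ d))
  (PySem.List.len sizes, PySem.List.maxD sizes (fun y => y) (-1))

-- ===== PRECONDITION & SPEC =====
def Spec_howManyPals (n : List Int) (out : Int × Int) : Prop := out = howManyPals_alt n
instance (n : List Int) (out : Int × Int) : Decidable (Spec_howManyPals n out) := by unfold Spec_howManyPals; infer_instance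

-- ===== CLAIM (what is proved, stated in full; the proofs are below) =====
def Claim_equal_howManyPals : Prop := ∀ (n : List Int), Dom_howManyPals n → Spec_howManyPals n (howManyPals n)

-- ===== LEMMAS AND PROOFS =====

-- Nat.toDigits (what PySem.Int.toStr prints) is the reversed digitChar image of Nat.digits
theorem toDigitsCore_eq (m : Nat) : ∀ (f : Nat) (ds : List Char), 1 ≤ m → m ≤ f →
    Nat.toDigitsCore 10 f m ds = ((Nat.digits 10 m).map Nat.digitChar).reverse ++ ds := by
  induction m using Nat.strong_induction_on with
  | _ m ih =>
    intro f ds hm hf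
    obtain ⟨f, rfl⟩ : ∃ f', f = f' + 1 := ⟨f - 1, by omega⟩
    rw [Nat.toDigitsCore]
    rw [Nat.digits_def' (by norm_num : (1:Nat) < 10) (by omega)]
    simp only [List.map_cons, List.reverse_cons]
    by_cases h10 : m / 10 = 0
    · simp [h10, Nat.digits_zero]
    · rw [if_neg h10, ih (m / 10) (by omega) f _ (by omega) (by omega)]
      simp

theorem toChars_pos (m : Nat) (hm : 1 ≤ m) :
    PySem.Int.toChars (m : Int) = ((Nat.digits 10 m).map Nat.digitChar).reverse := by
  have : ¬ ((m : Int) < 0) := by omega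
  simp only [PySem.Int.toChars, if_neg this, Int.toNat_natCast, Nat.toDigits]
  simpa using toDigitsCore_eq m (m + 1) [] hm (by omega)

theorem toChars_zero : PySem.Int.toChars 0 = ['0'] := by decide

theorem toChars_neg (x : Int) (hx : x < 0) :
    PySem.Int.toChars x = '-' :: ((Nat.digits 10 x.natAbs).map Nat.digitChar).reverse := by
  simp only [PySem.Int.toChars, if_pos hx, Nat.toDigits]
  have h1 : 1 ≤ x.natAbs := by omega
  have := toDigitsCore_eq x.natAbs (x.natAbs + 1) [] h1 (by omega)
  simp [this]

theorem digitChar_inj {a b : Nat} (ha : a < 10) (hb : b < 10)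
    (h : Nat.digitChar a = Nat.digitChar b) : a = b := by
  have key : ∀ a' b' : Fin 10, Nat.digitChar a' = Nat.digitChar b' → a' = b' := by decide
  have := key ⟨a, ha⟩ ⟨b, hb⟩ h
  simpa [Fin.ext_iff] using this

theorem digitChar_ne_dash {a : Nat} (ha : a < 10) : Nat.digitChar a ≠ '-' := by
  have key : ∀ a' : Fin 10, Nat.digitChar a' ≠ '-' := by decide
  exact key ⟨a, ha⟩

theorem map_digitChar_inj : ∀ (L1 L2 : List Nat), (∀ l ∈ L1, l < 10) → (∀ l ∈ L2, l < 10) →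
    L1.map Nat.digitChar = L2.map Nat.digitChar → L1 = L2 := by
  intro L1
  induction L1 with
  | nil => intro L2 _ _ h; cases L2 <;> simp_all
  | cons a t ih =>
    intro L2 h1 h2 h
    cases L2 with
    | nil => simp_all
    | cons b t2 =>
      simp only [List.map_cons, List.cons.injEq] at h
      have := digitChar_inj (h1 a (by simp)) (h2 b (by simp)) h.1
      rw [this, ih t2 (fun l hl => h1 l (by simp [hl])) (fun l hl => h2 l (by simp [hl])) h.2]

-- B's loop computes the reversed-digit value (as r*10+t on exit) and the digit count
theorem palLenGo_spec (m : Nat) : ∀ (r d : Int), 1 ≤ m →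
    (fun p : Int × Int × Int => (p.1 * 10 + p.2.1, p.2.2)) (palLenGo r (m : Int) d)
      = (r * 10 ^ (Nat.digits 10 m).length + (Nat.ofDigits 10 (Nat.digits 10 m).reverse : Nat),
         d + ((Nat.digits 10 m).length : Int) - 1) := by
  induction m using Nat.strong_induction_on with
  | _ m ih =>
    intro r d hm
    rw [palLenGo]
    rw [Nat.digits_def' (by norm_num : (1:Nat) < 10) (by omega)]
    by_cases h10 : 10 ≤ m
    · rw [dif_pos (by omega : (10:Int) ≤ (m:Int))]
      have hmod : PySem.Int.mod (m : Int) 10 = ((m % 10 : Nat) : Int) := PySem.Int.mod_natCast m 10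
      have hdiv : PySem.Int.floordiv (m : Int) 10 = ((m / 10 : Nat) : Int) := PySem.Int.floordiv_natCast m 10
      rw [hmod, hdiv, ih (m / 10) (by omega) _ _ (by omega)]
      have hlen : 1 ≤ (Nat.digits 10 (m / 10)).length := by
        have hne : Nat.digits 10 (m / 10) ≠ [] := Nat.digits_ne_nil_iff_ne_zero.mpr (by omega)
        have := List.length_pos_of_ne_nil hne
        omega
      simp only [Prod.mk.injEq]
      constructor
      · -- value component
        rw [List.reverse_cons, Nat.ofDigits_append]
        push_cast [Nat.ofDigits_singleton]
        simp only [List.length_cons, List.length_reverse, pow_succ]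
        ring
      · simp only [List.length_cons]
        push_cast
        omega
    · rw [dif_neg (by simpa using h10)]
      have : m / 10 = 0 := by omega
      simp [this, Nat.ofDigits_singleton]
      omega

-- reversed-digit value equals m iff the digit list is a palindrome
theorem revVal_eq_iff (m : Nat) (hm : 1 ≤ m) :
    Nat.ofDigits 10 (Nat.digits 10 m).reverse = m ↔ (Nat.digits 10 m).reverse = Nat.digits 10 m := by
  constructor
  · intro hv
    rcases hd : Nat.digits 10 m with _ | ⟨a, t⟩
    · simp_all [Nat.digits_eq_nil_iff_eq_zero]
    · have hd' := Nat.digits_def' (by norm_num : (1:Nat) < 10) (show 0 < m by omega)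
      have ha : a = m % 10 := by rw [hd] at hd'; exact (List.cons.injEq .. ▸ hd').1
      have hlt : ∀ l ∈ (Nat.digits 10 m).reverse, l < 10 := by
        intro l hl
        exact Nat.digits_lt_base (by norm_num) (List.mem_reverse.mp hl)
      by_cases ha0 : a = 0
      · -- last digit of reversed list is 0: value too small, contradiction
        exfalso
        rw [hd, List.reverse_cons, Nat.ofDigits_append] at hv
        have hlt' : Nat.ofDigits 10 t.reverse < 10 ^ t.reverse.length := by
          apply Nat.ofDigits_lt_base_pow_length (by norm_num)
          intro x hx
          exact Nat.digits_lt_base (by norm_num) (by rw [hd]; exact List.mem_cons_of_mem _ (List.mem_reverse.mp hx))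
        have hlow : 10 ^ (Nat.digits 10 m).length.pred ≤ m := by
          rw [Nat.length_digits 10 m (by norm_num) (by omega)]
          simpa using Nat.pow_log_le_self 10 (show m ≠ 0 by omega)
        rw [hd] at hlow
        simp only [ha0, Nat.ofDigits_singleton] at hv
        simp only [List.length_cons, List.length_reverse, Nat.pred_succ] at hlow hlt' hv
        omega
      · -- last digit nonzero: digits of the value recover the reversed list
        have hlast : ∀ h : (Nat.digits 10 m).reverse ≠ [], ((Nat.digits 10 m).reverse).getLast h ≠ 0 := by
          intro h
          have h2 : (Nat.digits 10 m).reverse.getLast? = some a := by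
            rw [List.getLast?_reverse, hd]; rfl
          rw [List.getLast?_eq_some_getLast h, Option.some_inj] at h2
          rw [h2]
          exact ha0
        have := Nat.digits_ofDigits 10 (by norm_num) _ hlt hlast
        rw [hv] at this
        rw [← hd]
        exact this.symm
  · intro h
    rw [h, Nat.ofDigits_digits]

theorem isPal_iff (x : Int) :
    isPalindromeA x = true ↔ PySem.Int.toChars x = (PySem.Int.toChars x).reverse := by
  simp only [isPalindromeA, PySem.Str.slice?_none_none_neg_one, Option.some_beq_some, beq_iff_eq,
    ← String.toList_inj, String.toList_ofList, PySem.Int.toList_toStr]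

theorem isPal_neg (x : Int) (hx : x < 0) : isPalindromeA x = false := by
  rw [← Bool.not_eq_true, isPal_iff, toChars_neg x hx]
  intro h
  have hh := congrArg List.head? h
  simp only [List.reverse_cons, List.reverse_reverse, List.head?_cons] at hh
  rcases hc : Nat.digits 10 x.natAbs with _ | ⟨dgt, t⟩
  · exact (Nat.digits_ne_nil_iff_ne_zero.mpr (show x.natAbs ≠ 0 by omega)) hc
  · rw [hc] at hh
    simp only [List.map_cons, List.cons_append, List.head?_cons, Option.some_inj] at hh
    exact digitChar_ne_dash (Nat.digits_lt_base (by norm_num) (hc ▸ List.mem_cons_self ..)) hh.symm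

-- per-element agreement: B's arithmetic test and digit count match A's string test and str-length
theorem palLen_spec (x : Int) :
    palLen x = if isPalindromeA x = true then ((PySem.Int.toChars x).length : Int) else -1 := by
  rcases lt_trichotomy x 0 with hx | hx | hx
  · rw [palLen, if_pos hx, isPal_neg x hx]
    simp
  · subst hx
    have h0 : palLenGo 0 0 1 = (0, 0, 1) := by rw [palLenGo]; norm_num
    rw [palLen, if_neg (by omega), h0]
    norm_num
    rw [if_pos (by decide : isPalindromeA 0 = true), toChars_zero]
    decide
  · -- x ≥ 1
    obtain ⟨m, rfl⟩ : ∃ m : Nat, x = (m : Int) := ⟨x.toNat, by omega⟩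
    have hm : 1 ≤ m := by omega
    have hgo := palLenGo_spec m 0 1 hm
    rw [palLen, if_neg (by omega)]
    rcases hres : palLenGo 0 (m : Int) 1 with ⟨r, t, d⟩
    rw [hres] at hgo
    dsimp only
    simp only [zero_mul, zero_add, Prod.mk.injEq] at hgo
    obtain ⟨hval, hd⟩ := hgo
    rw [toChars_pos m hm]
    have hiff := isPal_iff (m : Int)
    rw [toChars_pos m hm] at hiff
    have hlen : 1 ≤ (Nat.digits 10 m).length :=
      List.length_pos_of_ne_nil (Nat.digits_ne_nil_iff_ne_zero.mpr (by omega))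
    by_cases hpal : (Nat.digits 10 m).reverse = Nat.digits 10 m
    · have hv : Nat.ofDigits 10 (Nat.digits 10 m).reverse = m := (revVal_eq_iff m hm).mpr hpal
      have : (r * 10 + t == (m : Int)) = true := by
        rw [beq_iff_eq, hval, hv]
      rw [this, if_pos rfl]
      have : isPalindromeA (m : Int) = true := by
        rw [hiff, List.reverse_reverse, ← List.map_reverse, hpal]
      rw [this, if_pos rfl, hd]
      simp
    · have hv : Nat.ofDigits 10 (Nat.digits 10 m).reverse ≠ m :=
        fun hc => hpal ((revVal_eq_iff m hm).mp hc)
      have h1 : (r * 10 + t == (m : Int)) = false := by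
        rw [beq_eq_false_iff_ne, hval]
        exact_mod_cast hv
      rw [h1]
      have h2 : isPalindromeA (m : Int) = false := by
        rw [← Bool.not_eq_true, hiff]
        intro hc
        rw [List.reverse_reverse, ← List.map_reverse] at hc
        exact hpal (map_digitChar_inj _ _
          (fun l hl => Nat.digits_lt_base (by norm_num) (List.mem_reverse.mp hl))
          (fun l hl => Nat.digits_lt_base (by norm_num) hl) hc)
      rw [h2]
      simp

theorem strlen_eq (x : Int) :
    PySem.Str.len (PySem.Int.toStr x) = ((PySem.Int.toChars x).length : Int) := by
  rw [PySem.Str.len_eq, PySem.Int.toList_toStr]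

theorem if_gt_eq_max (a b : Int) : (if b > a then b else a) = max a b := by
  rcases lt_or_ge a b with h | h
  · simp [h, max_eq_right h.le]
  · simp [not_lt.mpr h, max_eq_left h]

theorem foldl_max_comm (t : List Int) (m x : Int) :
    t.foldl max (max m x) = max m (t.foldl max x) := by
  induction t generalizing x with
  | nil => rfl
  | cons a t ih => simpa [List.foldl, max_assoc] using ih (max x a)

-- A's accumulating loop, characterised as count + running max over the palindrome sublist
theorem loopA_eq (l : List Int) (h m : Int) :
    l.foldl (fun (st : Int × Int) number =>
      if isPalindromeA number then
        (st.1 + 1,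
         if PySem.Str.len (PySem.Int.toStr number) > st.2 then
           PySem.Str.len (PySem.Int.toStr number)
         else st.2)
      else st) (h, m)
    = (h + ((l.filter (fun x => isPalindromeA x)).length : Int),
       ((l.filter (fun x => isPalindromeA x)).map
          (fun x => PySem.Str.len (PySem.Int.toStr x))).foldl max m) := by
  induction l generalizing h m with
  | nil => simp
  | cons a t ih =>
    rw [List.foldl_cons, List.filter_cons]
    by_cases hp : isPalindromeA a
    · simp only [hp, if_true, List.map_cons, List.length_cons, List.foldl_cons]
      rw [ih, if_gt_eq_max]
      exact Prod.ext (by push_cast; ring) rfl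
    · simp only [hp]
      exact ih h m

-- B's size list is A's str-length image of the palindrome sublist
theorem sizes_eq (n : List Int) :
    (n.map palLen).filter (fun d => decide (0 ≤ d))
      = (n.filter (fun x => isPalindromeA x)).map
          (fun x => PySem.Str.len (PySem.Int.toStr x)) := by
  induction n with
  | nil => rfl
  | cons a t ih =>
    rw [List.map_cons, List.filter_cons, List.filter_cons]
    by_cases hp : isPalindromeA a
    · have hv : palLen a = ((PySem.Int.toChars a).length : Int) := by
        rw [palLen_spec, if_pos hp]
      rw [hv]
      simp only [hp, if_true, List.map_cons, strlen_eq]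
      simp [ih]
    · have hv : palLen a = -1 := by
        rw [palLen_spec, if_neg (by simp [hp])]
      rw [hv]
      simp only [hp]
      simpa using ih

theorem max_agg_eq (sizes : List Int) (hnn : ∀ y ∈ sizes, 0 ≤ y) :
    PySem.List.maxD sizes (fun y => y) (-1) = sizes.foldl max (-1) := by
  cases sizes with
  | nil => rfl
  | cons x t =>
    rw [show PySem.List.maxD (x :: t) (fun y => y) (-1) = (PySem.List.max? (x :: t) (fun y => y)).getD (-1) from rfl]
    rw [PySem.List.max?_id_cons, Option.getD_some, List.foldl_cons,
      show max (-1 : Int) x = max (-1) x from rfl, foldl_max_comm]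
    have hx : (0 : Int) ≤ x := hnn x (List.mem_cons_self ..)
    have := (PySem.List.le_foldl_max t x).1
    exact (max_eq_right (by omega)).symm

-- ===== VERDICT (by name: the statement is the Claim_ definition above) =====
theorem howManyPals_spec : Claim_equal_howManyPals := by
  intro n _
  show howManyPals n = howManyPals_alt n
  rw [howManyPals, howManyPals_alt, loopA_eq, sizes_eq]
  refine Prod.ext (by simp [PySem.List.len_eq]) ?_
  refine (max_agg_eq _ ?_).symm
  intro y hy
  rcases List.mem_map.mp hy with ⟨x, _, rfl⟩
  simp [PySem.Str.len]
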